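-- pv_equiv track=rewrite | github.com/GreenBuildingRegistry/usaddress-scourgify | scourgify/normalize.py | normalize_numbered_streets
-- ===== SOURCE A (Python) =====
-- def normalize_numbered_streets(parsed_addr):
--     # type: (MutableMapping[str, str]) -> MutableMapping[str, str]
--     """Change numbered street names to include missing original identifiers.
--
--     :param parsed_addr: address parsed into ordereddict per usaddress.
--     :type parsed_addr: Mapping
--     :return: parsed_addr with ordinal identifiers appended to numbered streets.
--     :rtype: dict"""
--     street_tags = ['StreetName', 'SecondStreetName']
--     for tag in street_tags:
--         post_type_tag = '{}PostType'.format(tag)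
--         # limits updates to numbered street names that include a post street
--         # type, since an ordinal indicator would be inappropriate for some
--         # numbered streets (ie. Country Road 97).
--         if tag in parsed_addr.keys() and post_type_tag in parsed_addr.keys():
--             try:
--                 cardinal = int(parsed_addr[tag])
--                 ord_indicator = get_ordinal_indicator(cardinal)
--                 parsed_addr[tag] = '{}{}'.format(cardinal, ord_indicator)
--             except ValueError:
--                 pass
--     return parsed_addr
--
-- def get_ordinal_indicator(number):
--     # type: (int) -> str
--     """Get the ordinal indicator suffix applicable to the supplied number.
--
--      Ordinal numbers are words representing position or rank in a sequential
--      order (1st, 2nd, 3rd, etc).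
--      Ordinal indicators are the suffix characters (st, nd, rd, th) that, when
--      applied to a numeral (int), denote that it an ordinal number.
--
--     :param number: int
--     :type: int
--     :return: ordinal indicator appropriate to the number supplied.
--     :rtype: str
--     """
--     str_num = str(number)
--     digits = len(str_num)
--     if str_num[-1] == '1' and not (digits >= 2 and str_num[-2:] == '11'):
--         return 'st'
--     elif str_num[-1] == '2' and not (digits >= 2 and str_num[-2:] == '12'):
--         return 'nd'
--     elif str_num[-1] == '3' and not (digits >= 2 and str_num[-2:] == '13'):
--         return 'rd'
--     else:
--         return 'th'
-- ===== SOURCE B (Python) =====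
-- # Single pass over the dict's items with a modular-arithmetic ordinal helper
-- # (A loops over the two tag names and inspects the decimal string's last chars).
-- # Mutates parsed_addr in place, like the original.
--
-- def get_ordinal_indicator(number):
--     n = abs(number)
--     if 11 <= n % 100 <= 13:
--         return 'th'
--     d = n % 10
--     if d == 1:
--         return 'st'
--     if d == 2:
--         return 'nd'
--     if d == 3:
--         return 'rd'
--     return 'th'
--
--
-- def normalize_numbered_streets(parsed_addr):
--     for tag, value in list(parsed_addr.items()):
--         if tag in ('StreetName', 'SecondStreetName') \
--                 and '{}PostType'.format(tag) in parsed_addr: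
--             try:
--                 cardinal = int(value)
--             except ValueError:
--                 continue
--             parsed_addr[tag] = '{}{}'.format(cardinal, get_ordinal_indicator(cardinal))
--     return parsed_addr
-- ===== Notes on version B (the rewrite author's own statement) =====
-- stated objective: idiomatic
-- what changed: B derives the ordinal suffix by modular arithmetic (abs, n%100 teen check, n%10 branch) instead of inspecting the last one/two characters of str(n), and rewrites the dict in a single pass over its items instead of two keyed lookup-and-update iterations over a tag list.
import Mathlib
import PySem

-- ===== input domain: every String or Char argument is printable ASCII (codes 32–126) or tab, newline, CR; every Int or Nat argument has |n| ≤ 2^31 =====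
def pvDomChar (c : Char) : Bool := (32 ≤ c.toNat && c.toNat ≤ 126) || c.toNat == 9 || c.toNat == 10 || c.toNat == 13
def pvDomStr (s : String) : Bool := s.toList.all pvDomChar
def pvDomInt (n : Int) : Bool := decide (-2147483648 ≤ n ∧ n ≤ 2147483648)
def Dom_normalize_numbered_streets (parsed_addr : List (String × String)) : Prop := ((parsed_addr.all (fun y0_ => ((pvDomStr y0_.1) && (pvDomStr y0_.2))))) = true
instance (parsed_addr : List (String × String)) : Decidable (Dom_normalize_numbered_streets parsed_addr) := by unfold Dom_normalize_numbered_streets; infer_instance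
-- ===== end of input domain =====

-- B appends ordinal suffixes in one pass over the dict's items using modular arithmetic, where A
-- iterates over a tag list and inspects the last characters of str(n); both Pythons mutate the
-- dict in place, and the equivalence proved here is about the returned mapping.

-- ===== PORT A =====

-- A's get_ordinal_indicator: inspect str(number)[-1] and str(number)[-2:]
def get_ordinal_indicator (number : Int) : String :=
  let str_num : List Char := PySem.Int.toChars number
  let digits : Nat := str_num.length
  if PySem.List.pyGetD str_num (-1) ' ' == '1' && !(decide (2 ≤ digits) && (PySem.List.slice str_num (some (-2)) none == ['1', '1'])) then "st"
  else if PySem.List.pyGetD str_num (-1) ' ' == '2' && !(decide (2 ≤ digits) && (PySem.List.slice str_num (some (-2)) none == ['1', '2'])) then "nd"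
  else if PySem.List.pyGetD str_num (-1) ' ' == '3' && !(decide (2 ≤ digits) && (PySem.List.slice str_num (some (-2)) none == ['1', '3'])) then "rd"
  else "th"

-- one iteration of A's `for tag in street_tags` loop (the getD under the contains guard is parsed_addr[tag])
def pvStepA (d : PySem.Dict String String) (tag : String) : PySem.Dict String String :=
  let post_type_tag := tag ++ "PostType"
  if d.contains tag && d.contains post_type_tag then
    match PySem.Int.ofStr? (d.getD tag "") with
    | some cardinal => d.insert tag (PySem.Int.toStr cardinal ++ get_ordinal_indicator cardinal)
    | none => d
  else d

def normalize_numbered_streets (parsed_addr : List (String × String)) : List (String × String) :=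
  (pvStepA (pvStepA (PySem.Dict.mk parsed_addr) "StreetName") "SecondStreetName").items

-- ===== PORT B =====

-- Source B's get_ordinal_indicator: modular arithmetic on abs(number)
def get_ordinal_indicator_alt (number : Int) : String :=
  let n : Nat := number.natAbs
  if 11 ≤ n % 100 ∧ n % 100 ≤ 13 then "th"
  else
    let d := n % 10
    if d = 1 then "st"
    else if d = 2 then "nd"
    else if d = 3 then "rd"
    else "th"

-- Source B's single pass over the items; the key set never changes during the loop
def normalize_numbered_streets_alt (parsed_addr : List (String × String)) : List (String × String) :=
  let keys := parsed_addr.map (·.1)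
  parsed_addr.map (fun p =>
    if (p.1 == "StreetName" || p.1 == "SecondStreetName") && keys.contains (p.1 ++ "PostType") then
      match PySem.Int.ofStr? p.2 with
      | some cardinal => (p.1, PySem.Int.toStr cardinal ++ get_ordinal_indicator_alt cardinal)
      | none => p
    else p)

-- ===== PRECONDITION & SPEC =====
-- Pre_ excludes association lists with duplicate keys: those do not encode any Python dict (the
-- Python argument is a dict, whose keys are necessarily distinct), so nothing A returns on is lost.
def Pre_normalize_numbered_streets (parsed_addr : List (String × String)) : Prop :=
  (parsed_addr.map (·.1)).Nodup

instance (parsed_addr : List (String × String)) : Decidable (Pre_normalize_numbered_streets parsed_addr) := by unfold Pre_normalize_numbered_streets; infer_instance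

def pvWitness_normalize_numbered_streets : (List (String × String)) :=
  [("StreetName", "21"), ("StreetNamePostType", "St")]

def Spec_normalize_numbered_streets (parsed_addr : List (String × String)) (out : List (String × String)) : Prop := out = normalize_numbered_streets_alt parsed_addr
instance (parsed_addr : List (String × String)) (out : List (String × String)) : Decidable (Spec_normalize_numbered_streets parsed_addr out) := by unfold Spec_normalize_numbered_streets; infer_instance

-- ===== CLAIM (what is proved, stated in full; the proofs are below) =====
def Claim_equal_normalize_numbered_streets : Prop := ∀ (parsed_addr : List (String × String)), Dom_normalize_numbered_streets parsed_addr → Pre_normalize_numbered_streets parsed_addr → Spec_normalize_numbered_streets parsed_addr (normalize_numbered_streets parsed_addr)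

-- ===== LEMMAS AND PROOFS =====

lemma pv_core_spec : ∀ n : Nat, ∀ f acc, n < f → Nat.toDigitsCore 10 f n acc = Nat.toDigitsCore 10 (n+1) n [] ++ acc := by
  intro n
  induction n using Nat.strong_induction_on with
  | _ n ih =>
    intro f acc hf
    obtain ⟨f, rfl⟩ : ∃ f', f = f' + 1 := ⟨f - 1, by omega⟩
    by_cases h : n / 10 = 0
    · simp [Nat.toDigitsCore, h]
    · have hge : 10 ≤ n := by omega
      have hlt : n / 10 < n := Nat.div_lt_self (by omega) (by norm_num)
      have e1 : Nat.toDigitsCore 10 (f + 1) n acc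
          = Nat.toDigitsCore 10 f (n / 10) ((n % 10).digitChar :: acc) := by
        rw [Nat.toDigitsCore]; simp [h]
      have e2 : Nat.toDigitsCore 10 (n + 1) n []
          = Nat.toDigitsCore 10 n (n / 10) ((n % 10).digitChar :: []) := by
        rw [Nat.toDigitsCore]; simp [h]
      rw [e1, e2, ih (n / 10) hlt f _ (by omega), ih (n / 10) hlt n _ hlt]
      simp

lemma pv_toDigits_lt {n : Nat} (h : n < 10) : Nat.toDigits 10 n = [Nat.digitChar n] := by
  have h0 : n / 10 = 0 := Nat.div_eq_of_lt h
  simp [Nat.toDigits, Nat.toDigitsCore, h0, Nat.mod_eq_of_lt h]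

lemma pv_toDigits_ge {n : Nat} (h : 10 ≤ n) :
    Nat.toDigits 10 n = Nat.toDigits 10 (n / 10) ++ [Nat.digitChar (n % 10)] := by
  have h0 : ¬ n / 10 = 0 := by omega
  have hlt : n / 10 < n := Nat.div_lt_self (by omega) (by norm_num)
  have e : Nat.toDigits 10 n = Nat.toDigitsCore 10 n (n / 10) [(n % 10).digitChar] := by
    rw [Nat.toDigits, Nat.toDigitsCore]; simp [h0]
  rw [e, pv_core_spec (n / 10) n _ hlt, Nat.toDigits]

lemma pv_toDigits_concat (k : Nat) : ∃ pre, Nat.toDigits 10 k = pre ++ [Nat.digitChar (k % 10)] := by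
  rcases Nat.lt_or_ge k 10 with h | h
  · exact ⟨[], by rw [pv_toDigits_lt h, Nat.mod_eq_of_lt h]; rfl⟩
  · exact ⟨_, pv_toDigits_ge h⟩


lemma pv_chars (number : Int) :
    PySem.Int.toChars number =
      if number < 0 then '-' :: Nat.toDigits 10 number.natAbs else Nat.toDigits 10 number.natAbs := by
  by_cases hneg : number < 0
  · simp [PySem.Int.toChars, hneg]
  · simp only [PySem.Int.toChars, if_neg hneg]
    congr 1
    omega

lemma pv_A_eval (number : Int) (lastc : Char) (two : Bool) (s2 : List Char)
    (h1 : PySem.List.pyGetD (PySem.Int.toChars number) (-1) ' ' = lastc)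
    (h2 : decide (2 ≤ (PySem.Int.toChars number).length) = two)
    (h3 : PySem.List.slice (PySem.Int.toChars number) (some (-2)) none = s2) :
    get_ordinal_indicator number =
      (if lastc == '1' && !(two && (s2 == ['1', '1'])) then "st"
       else if lastc == '2' && !(two && (s2 == ['1', '2'])) then "nd"
       else if lastc == '3' && !(two && (s2 == ['1', '3'])) then "rd"
       else "th") := by
  simp only [get_ordinal_indicator, h1, h2, h3]

lemma pv_shape (cs pre : List Char) (d1 d0 : Char) (hcs : cs = pre ++ [d1, d0]) :
    PySem.List.pyGetD cs (-1) ' ' = d0 ∧ decide (2 ≤ cs.length) = true ∧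
      PySem.List.slice cs (some (-2)) none = [d1, d0] := by
  subst hcs
  refine ⟨?_, by simp, ?_⟩
  · have e : pre ++ [d1, d0] = (pre ++ [d1]) ++ [d0] := by simp
    rw [e, PySem.List.pyGetD_neg_one_append_singleton]
  · rw [PySem.List.slice_from_neg_ofNat _ 2 (by norm_num)]
    have e : (pre ++ [d1, d0]).length - 2 = pre.length := by simp
    rw [e, List.drop_left]

lemma pv_shape1 (cs : List Char) (d0 : Char) (hcs : cs = [d0]) :
    PySem.List.pyGetD cs (-1) ' ' = d0 ∧ decide (2 ≤ cs.length) = false ∧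
      PySem.List.slice cs (some (-2)) none = [d0] := by
  subst hcs
  refine ⟨?_, by simp, ?_⟩
  · have e : [d0] = ([] : List Char) ++ [d0] := by simp
    rw [e, PySem.List.pyGetD_neg_one_append_singleton]
  · rw [PySem.List.slice_from_neg_ofNat _ 2 (by norm_num)]
    simp

lemma pv_dc1 (d : Nat) (hd : d < 10) : Nat.digitChar d = '1' ↔ d = 1 := by
  interval_cases d <;> decide
lemma pv_dc2 (d : Nat) (hd : d < 10) : Nat.digitChar d = '2' ↔ d = 2 := by
  interval_cases d <;> decide
lemma pv_dc3 (d : Nat) (hd : d < 10) : Nat.digitChar d = '3' ↔ d = 3 := by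
  interval_cases d <;> decide

lemma pv_A_char (number : Int) :
    get_ordinal_indicator number =
      (if number.natAbs % 10 = 1 ∧ ¬ (10 ≤ number.natAbs ∧ number.natAbs / 10 % 10 = 1) then "st"
       else if number.natAbs % 10 = 2 ∧ ¬ (10 ≤ number.natAbs ∧ number.natAbs / 10 % 10 = 1) then "nd"
       else if number.natAbs % 10 = 3 ∧ ¬ (10 ≤ number.natAbs ∧ number.natAbs / 10 % 10 = 1) then "rd"
       else "th") := by
  have hm10 : number.natAbs % 10 < 10 := Nat.mod_lt _ (by norm_num)
  have hq10 : number.natAbs / 10 % 10 < 10 := Nat.mod_lt _ (by norm_num)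
  by_cases hge : 10 ≤ number.natAbs
  · obtain ⟨pre, hpre⟩ := pv_toDigits_concat (number.natAbs / 10)
    have hdig : Nat.toDigits 10 number.natAbs =
        (pre ++ [Nat.digitChar (number.natAbs / 10 % 10)]) ++ [Nat.digitChar (number.natAbs % 10)] := by
      rw [pv_toDigits_ge hge, hpre]
    by_cases hneg : number < 0
    · have hcs : PySem.Int.toChars number =
          ('-' :: (pre ++ [Nat.digitChar (number.natAbs / 10 % 10)])) ++ [Nat.digitChar (number.natAbs % 10)] := by
        rw [pv_chars, if_pos hneg, hdig]; rfl
      have hcs' : PySem.Int.toChars number =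
          ('-' :: pre) ++ [Nat.digitChar (number.natAbs / 10 % 10), Nat.digitChar (number.natAbs % 10)] := by
        rw [hcs]; simp
      obtain ⟨h1, h2, h3⟩ := pv_shape _ _ _ _ hcs'
      rw [pv_A_eval number _ _ _ h1 h2 h3]
      simp [pv_dc1 _ hm10, pv_dc2 _ hm10, pv_dc3 _ hm10, pv_dc1 _ hq10, hge]
      all_goals split_ifs <;> first | rfl | omega
    · have hcs' : PySem.Int.toChars number =
          pre ++ [Nat.digitChar (number.natAbs / 10 % 10), Nat.digitChar (number.natAbs % 10)] := by
        rw [pv_chars, if_neg hneg, hdig]; simp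
      obtain ⟨h1, h2, h3⟩ := pv_shape _ _ _ _ hcs'
      rw [pv_A_eval number _ _ _ h1 h2 h3]
      simp [pv_dc1 _ hm10, pv_dc2 _ hm10, pv_dc3 _ hm10, pv_dc1 _ hq10, hge]
      all_goals split_ifs <;> first | rfl | omega
  · have hlt10 : number.natAbs < 10 := by omega
    have hmod : number.natAbs % 10 = number.natAbs := Nat.mod_eq_of_lt hlt10
    by_cases hneg : number < 0
    · have hcs : PySem.Int.toChars number = ([] : List Char) ++ ['-', Nat.digitChar number.natAbs] := by
        rw [pv_chars, if_pos hneg, pv_toDigits_lt hlt10]; rfl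
      obtain ⟨h1, h2, h3⟩ := pv_shape _ _ _ _ hcs
      rw [pv_A_eval number _ _ _ h1 h2 h3]
      have hne1 : ¬ (('-' : Char) = '1') := by decide
      have hne2 : ¬ (('-' : Char) = '2') := by decide
      have hne3 : ¬ (('-' : Char) = '3') := by decide
      simp [hne1, hne2, hne3, hmod, pv_dc1 _ hlt10, pv_dc2 _ hlt10, pv_dc3 _ hlt10, hge]
      all_goals split_ifs <;> first | rfl | omega
    · have hcs : PySem.Int.toChars number = [Nat.digitChar number.natAbs] := by
        rw [pv_chars, if_neg hneg, pv_toDigits_lt hlt10]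
      obtain ⟨h1, h2, h3⟩ := pv_shape1 _ _ hcs
      rw [pv_A_eval number _ _ _ h1 h2 h3]
      simp [hmod, pv_dc1 _ hlt10, pv_dc2 _ hlt10, pv_dc3 _ hlt10, hge]
      all_goals split_ifs <;> first | rfl | omega

lemma pv_ord_eq (number : Int) : get_ordinal_indicator number = get_ordinal_indicator_alt number := by
  rw [pv_A_char]
  simp only [get_ordinal_indicator_alt]
  split_ifs <;> first | rfl | omega

lemma pv_keys_step (d : PySem.Dict String String) (tag : String) : (pvStepA d tag).keys = d.keys := by
  unfold pvStepA
  by_cases h1 : d.contains tag = true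
  · by_cases h2 : d.contains (tag ++ "PostType") = true
    · simp only [h1, h2, Bool.and_self, if_true]
      cases hp : PySem.Int.ofStr? (d.getD tag "") with
      | some c => exact PySem.Dict.keys_insert_of_contains d _ h1
      | none => rfl
    · simp [h1, h2]
  · simp [h1]

lemma pv_step_items (d : PySem.Dict String String) (tag : String) (hnd : d.keys.Nodup) :
    (pvStepA d tag).items = d.items.map (fun p =>
      if p.1 == tag && d.contains (tag ++ "PostType") then
        match PySem.Int.ofStr? p.2 with
        | some cardinal => (tag, PySem.Int.toStr cardinal ++ get_ordinal_indicator cardinal)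
        | none => p
      else p) := by
  unfold pvStepA
  by_cases h2 : d.contains (tag ++ "PostType") = true
  · by_cases h1 : d.contains tag = true
    · simp only [h1, h2, Bool.and_self, if_true]
      cases hp : PySem.Int.ofStr? (d.getD tag "") with
      | some c =>
        rw [PySem.Dict.items_insert_of_contains d _ h1]
        refine List.map_congr_left ?_
        intro p hpm
        by_cases he : (p.1 == tag) = true
        · have heq : p.1 = tag := by exact beq_iff_eq.mp he
          have hmem : (tag, p.2) ∈ d.items := by rw [← heq]; exact hpm
          have hv : d.getD tag "" = p.2 := PySem.Dict.getD_of_mem_items d hmem hnd ""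
          rw [hv] at hp
          simp [he, h2, hp]
        · simp [he]
      | none =>
        nth_rewrite 1 [show d.items = d.items.map id from (List.map_id d.items).symm]
        refine List.map_congr_left ?_
        intro p hpm
        by_cases he : (p.1 == tag) = true
        · have heq : p.1 = tag := by exact beq_iff_eq.mp he
          have hmem : (tag, p.2) ∈ d.items := by rw [← heq]; exact hpm
          have hv : d.getD tag "" = p.2 := PySem.Dict.getD_of_mem_items d hmem hnd ""
          rw [hv] at hp
          simp [he, h2, hp]
        · simp [he]
    · have hb : d.contains tag = false := by simpa using h1
      rw [if_neg (show ¬ ((d.contains tag && d.contains (tag ++ "PostType")) = true) by simp [hb])]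
      nth_rewrite 1 [show d.items = d.items.map id from (List.map_id d.items).symm]
      refine List.map_congr_left ?_
      intro p hpm
      by_cases he : (p.1 == tag) = true
      · exfalso
        have heq : p.1 = tag := beq_iff_eq.mp he
        have hk : p.1 ∈ d.keys := List.mem_map_of_mem hpm
        rw [heq] at hk
        have hct : d.contains tag = true := by
          rw [PySem.Dict.contains_eq_decide_mem_keys]
          exact decide_eq_true hk
        rw [hb] at hct
        simp at hct
      · simp [he]
  · have hb2 : d.contains (tag ++ "PostType") = false := by simpa using h2
    rw [if_neg (show ¬ ((d.contains tag && d.contains (tag ++ "PostType")) = true) by simp [hb2])]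
    nth_rewrite 1 [show d.items = d.items.map id from (List.map_id d.items).symm]
    refine List.map_congr_left ?_
    intro p hpm
    simp [hb2]

lemma pv_main (l : List (String × String)) (hPre : (l.map (·.1)).Nodup) :
    normalize_numbered_streets l = normalize_numbered_streets_alt l := by
  unfold normalize_numbered_streets normalize_numbered_streets_alt
  have hkeys0 : (PySem.Dict.mk l).keys = l.map (·.1) := rfl
  have hnd0 : (PySem.Dict.mk l).keys.Nodup := by rw [hkeys0]; exact hPre
  have hnd1 : (pvStepA (PySem.Dict.mk l) "StreetName").keys.Nodup := by
    rw [pv_keys_step]; exact hnd0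
  have hc2 : (pvStepA (PySem.Dict.mk l) "StreetName").contains ("SecondStreetName" ++ "PostType")
      = (PySem.Dict.mk l).contains ("SecondStreetName" ++ "PostType") := by
    rw [PySem.Dict.contains_eq_decide_mem_keys, PySem.Dict.contains_eq_decide_mem_keys, pv_keys_step]
  rw [pv_step_items _ _ hnd1, hc2, pv_step_items _ _ hnd0]
  show ((l.map _).map _) = _
  rw [List.map_map]
  refine List.map_congr_left ?_
  intro p hpl
  have hcont : ∀ k : String, (PySem.Dict.mk l).contains k = (l.map (·.1)).contains k := by
    intro k
    rw [PySem.Dict.contains_eq_decide_mem_keys, hkeys0]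
    cases hb : (l.map (·.1)).contains k with
    | true => exact decide_eq_true (List.contains_iff_mem.mp hb)
    | false =>
      refine decide_eq_false fun hmem => ?_
      rw [List.contains_iff_mem.mpr hmem] at hb
      simp at hb
  simp only [Function.comp]
  by_cases hA : p.1 = "StreetName"
  · rw [hcont]
    by_cases hpost : ((l.map (·.1)).contains ("StreetName" ++ "PostType")) = true
    · simp only [] at hpost
      simp at hpost
      cases hp2 : PySem.Int.ofStr? p.2 with
      | some c =>
        simp [hA, hpost, hp2, pv_ord_eq]
      | none =>
        simp [hA, hpost, hp2]
    · have hb := hpost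
      simp at hb
      simp [hA, hb]
  · by_cases hB : p.1 = "SecondStreetName"
    · rw [hcont]
      by_cases hpost : ((l.map (·.1)).contains ("SecondStreetName" ++ "PostType")) = true
      · simp at hpost
        cases hp2 : PySem.Int.ofStr? p.2 with
        | some c =>
          simp [hA, hB, hpost, hp2, pv_ord_eq]
        | none =>
          simp [hA, hB, hpost, hp2]
      · have hb := hpost
        simp at hb
        simp [hA, hB, hb]
    · simp [hA, hB]

-- ===== VERDICT (by name: the statement is the Claim_ definition above) =====
theorem normalize_numbered_streets_spec : Claim_equal_normalize_numbered_streets := by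
  intro parsed_addr hDom hPre
  unfold Spec_normalize_numbered_streets
  exact pv_main parsed_addr hPre
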